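-- pv_equiv track=rewrite | github.com/Hamster-Furtif/Fluff-Plus-Plus | FppToCasio.py | replaceLogical
-- ===== SOURCE A (Python) =====
-- def replaceLogical(split):
--     i = 1
--     for i in range(1, len(split)):
--         if(split[i] == "=" and split[i-1] in "=!><"):
--             split[i-1] += "="
--             split[i] = ""
--     while("" in split):
--         split.remove("")
--     return split
-- ===== SOURCE B (Python) =====
-- def replaceLogical(split):
--     result = []
--     if split:
--         prev = split[0]
--         for cur in split[1:]:
--             if cur == "=" and prev in "=!><":
--                 prev += "="
--                 cur = ""
--             if prev != "":
--                 result.append(prev)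
--             prev = cur
--         if prev != "":
--             result.append(prev)
--     split[:] = result
--     return split
-- ===== Notes on version B (the rewrite author's own statement) =====
-- stated objective: simpler
-- what changed: Replaced A's index-based mark-in-place pass followed by a repeated remove('') scan with a single forward scan carrying a prev accumulator that appends only non-empty tokens, so no second removal pass exists.
import Mathlib
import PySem

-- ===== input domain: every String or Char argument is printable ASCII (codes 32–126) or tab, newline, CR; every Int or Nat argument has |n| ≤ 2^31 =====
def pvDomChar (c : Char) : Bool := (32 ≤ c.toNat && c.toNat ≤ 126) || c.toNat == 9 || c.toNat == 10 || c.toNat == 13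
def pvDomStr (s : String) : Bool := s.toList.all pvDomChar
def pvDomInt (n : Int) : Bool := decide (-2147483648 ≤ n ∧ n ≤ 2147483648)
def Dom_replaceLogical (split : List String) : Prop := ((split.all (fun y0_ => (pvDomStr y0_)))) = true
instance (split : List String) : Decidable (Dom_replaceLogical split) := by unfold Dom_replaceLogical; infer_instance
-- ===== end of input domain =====

-- B builds the result in ONE forward scan with a `prev` accumulator (simpler decomposition)
-- instead of A's mark-in-place-then-repeatedly-remove pass; equivalence is about the RETURN
-- value only (both Pythons mutate the argument list; Source B mirrors it with `split[:] = result`).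

-- ===== PORT A =====
-- one iteration of A's `for i in range(1, len(split))` body, on the mutable list state
def replaceLogicalStep (s : List String) (i : Nat) : List String :=
  if s.getD i "" = "=" ∧ PySem.Str.isIn (s.getD (i - 1) "") "=!><" = true then
    (s.set (i - 1) (s.getD (i - 1) "" ++ "=")).set i ""
  else s

-- A's `while "" in split: split.remove("")`; `remove` of a present element is List.erase
def removeEmptyLoop (l : List String) : List String :=
  if h : "" ∈ l then removeEmptyLoop (l.erase "")
  else l
termination_by l.length
decreasing_by
  have h1 := List.length_erase_of_mem h
  have h2 := List.length_pos_of_mem h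
  omega

def replaceLogical (split : List String) : List String :=
  removeEmptyLoop ((List.range' 1 (split.length - 1)).foldl replaceLogicalStep split)

-- ===== PORT B =====
-- one iteration of Source B's `for cur in split[1:]` body, state = (result, prev)
-- Source B's `if prev != "": result.append(prev)` followed by `prev = cur`
def replaceLogicalAltPush (res : List String) (pc : String × String) : List String × String :=
  (if pc.1 ≠ "" then res ++ [pc.1] else res, pc.2)

def replaceLogicalAltStep (st : List String × String) (cur : String) : List String × String :=
  replaceLogicalAltPush st.1
    (if cur = "=" ∧ PySem.Str.isIn st.2 "=!><" = true then (st.2 ++ "=", "") else (st.2, cur))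

def replaceLogical_alt (split : List String) : List String :=
  match split with
  | [] => []                         -- `if split:` is false, result stays []
  | h :: t =>
    let st := t.foldl replaceLogicalAltStep ([], h)
    if st.2 ≠ "" then st.1 ++ [st.2] else st.1

-- ===== PRECONDITION & SPEC =====
def Spec_replaceLogical (split : List String) (out : List String) : Prop := out = replaceLogical_alt split
instance (split : List String) (out : List String) : Decidable (Spec_replaceLogical split out) := by unfold Spec_replaceLogical; infer_instance

-- ===== CLAIM (what is proved, stated in full; the proofs are below) =====
def Claim_equal_replaceLogical : Prop := ∀ (split : List String), Dom_replaceLogical split → Spec_replaceLogical split (replaceLogical split)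

-- ===== LEMMAS AND PROOFS =====

-- the pairwise pass both programs perform, as a pure recursion (proof-side spec)
def passFn (prev : String) (l : List String) : List String :=
  match l with
  | [] => [prev]
  | c :: rest =>
    if c = "=" ∧ PySem.Str.isIn prev "=!><" = true then (prev ++ "=") :: passFn "" rest
    else prev :: passFn c rest

-- the non-empty test, kept opaque to simp
def pNE (s : String) : Bool := decide (s ≠ "")

theorem getD_append_cons (pre : List String) (x : String) (rest : List String) (d : String) :
    (pre ++ x :: rest).getD pre.length d = x := by
  simp [List.getD_eq_getElem?_getD]

theorem set_append_cons (pre : List String) (x y : String) (rest : List String) :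
    (pre ++ x :: rest).set pre.length y = pre ++ y :: rest := by
  induction pre with
  | nil => simp
  | cons a pre ih => simp [ih]

theorem loopA_eq_pass (suffix : List String) : ∀ (pre : List String) (prev : String),
    (List.range' (pre.length + 1) suffix.length).foldl replaceLogicalStep (pre ++ prev :: suffix)
      = pre ++ passFn prev suffix := by
  induction suffix with
  | nil => intro pre prev; simp [passFn]
  | cons c rest ih =>
    intro pre prev
    simp only [List.length_cons]
    rw [List.range'_succ, List.foldl_cons]
    have hstep : replaceLogicalStep (pre ++ prev :: c :: rest) (pre.length + 1)
        = if c = "=" ∧ PySem.Str.isIn prev "=!><" = true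
          then (pre ++ [prev ++ "="]) ++ "" :: rest
          else pre ++ prev :: c :: rest := by
      have h1 : (pre ++ prev :: c :: rest).getD (pre.length + 1) "" = c := by
        have := getD_append_cons (pre ++ [prev]) c rest ""
        simpa using this
      have h0 : (pre ++ prev :: c :: rest).getD (pre.length + 1 - 1) "" = prev := by
        simpa using getD_append_cons pre prev (c :: rest) ""
      unfold replaceLogicalStep
      rw [h1, h0]
      split_ifs with h
      · have hs1 : (pre ++ prev :: c :: rest).set (pre.length + 1 - 1) (prev ++ "=")
            = pre ++ (prev ++ "=") :: c :: rest := by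
          simpa using set_append_cons pre prev (prev ++ "=") (c :: rest)
        rw [hs1]
        have := set_append_cons (pre ++ [prev ++ "="]) c "" rest
        simpa using this
      · rfl
    rw [hstep]
    by_cases h : c = "=" ∧ PySem.Str.isIn prev "=!><" = true
    · rw [if_pos h]
      simp only [passFn]; rw [if_pos h]
      have := ih (pre ++ [prev ++ "="]) ""
      simp only [List.length_append, List.length_cons, List.length_nil, Nat.zero_add,
        List.append_assoc, List.cons_append, List.nil_append] at this ⊢
      exact this
    · rw [if_neg h]
      simp only [passFn]; rw [if_neg h]
      -- A leaves positions i-1, i untouched; one more step of the range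
      have := ih (pre ++ [prev]) c
      simp only [List.length_append, List.length_cons, List.length_nil, Nat.zero_add,
        List.append_assoc, List.cons_append, List.nil_append] at this ⊢
      exact this

theorem filter_erase_empty (l : List String) :
    (l.erase "").filter pNE = l.filter pNE := by
  induction l with
  | nil => rfl
  | cons a l ih =>
    by_cases h : a = ""
    · subst h
      rw [List.erase_cons_head, List.filter_cons]
      have : pNE "" = false := by decide
      rw [this]; simp
    · rw [List.erase_cons_tail (by simpa using h), List.filter_cons, List.filter_cons, ih]

theorem removeEmptyLoop_eq_filter (l : List String) :
    removeEmptyLoop l = l.filter pNE := by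
  rw [removeEmptyLoop.eq_def]
  split_ifs with h
  · have := removeEmptyLoop_eq_filter (l.erase "")
    rw [this, filter_erase_empty]
  · rw [List.filter_eq_self.2]
    intro a ha
    simp only [pNE, ne_eq, decide_eq_true_eq]
    intro he; exact h (he ▸ ha)
termination_by l.length
decreasing_by
  have h1 := List.length_erase_of_mem h
  have h2 := List.length_pos_of_mem h
  omega

theorem pushCase (res : List String) (p : String) :
    (if pNE p = true then res ++ [p] else res) = res ++ List.filter pNE [p] := by
  by_cases h : pNE p = true
  · rw [if_pos h, List.filter_cons, if_pos h, List.filter_nil]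
  · rw [if_neg h, List.filter_cons, if_neg h, List.filter_nil, List.append_nil]

theorem pNE_ite (res : List String) (p : String) :
    (if p ≠ "" then res ++ [p] else res) = (if pNE p = true then res ++ [p] else res) := by
  simp [pNE]

theorem loopB_eq_filter_pass (t : List String) : ∀ (res : List String) (prev : String),
    (let st := t.foldl replaceLogicalAltStep (res, prev);
     if st.2 ≠ "" then st.1 ++ [st.2] else st.1)
      = res ++ (passFn prev t).filter pNE := by
  induction t with
  | nil =>
    intro res prev
    simp only [List.foldl_nil]
    rw [pNE_ite, pushCase]
    rfl
  | cons c rest ih =>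
    intro res prev
    simp only [List.foldl_cons]
    by_cases h : c = "=" ∧ PySem.Str.isIn prev "=!><" = true
    · have hstep : replaceLogicalAltStep (res, prev) c
          = (if pNE (prev ++ "=") = true then res ++ [prev ++ "="] else res, "") := by
        unfold replaceLogicalAltStep
        rw [if_pos h]
        unfold replaceLogicalAltPush
        rw [pNE_ite]
      rw [hstep]
      have := ih (if pNE (prev ++ "=") = true then res ++ [prev ++ "="] else res) ""
      simp only at this
      rw [this, pushCase, List.append_assoc]
      simp only [passFn]; rw [if_pos h]
      by_cases he : pNE (prev ++ "=") = true
      · simp [he]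
      · simp only [Bool.not_eq_true] at he
        simp [he]
    · have hstep : replaceLogicalAltStep (res, prev) c
          = (if pNE prev = true then res ++ [prev] else res, c) := by
        unfold replaceLogicalAltStep
        rw [if_neg h]
        unfold replaceLogicalAltPush
        rw [pNE_ite]
      rw [hstep]
      have := ih (if pNE prev = true then res ++ [prev] else res) c
      simp only at this
      rw [this, pushCase, List.append_assoc]
      simp only [passFn]; rw [if_neg h]
      by_cases he : pNE prev = true
      · simp [he]
      · simp only [Bool.not_eq_true] at he
        simp [he]

theorem replaceLogical_eq (split : List String) :
    replaceLogical split = (match split with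
      | [] => []
      | h :: t => (passFn h t).filter pNE) := by
  match split with
  | [] => simp [replaceLogical, removeEmptyLoop_eq_filter]
  | h :: t =>
    unfold replaceLogical
    have := loopA_eq_pass t [] h
    simp only [List.length_nil, List.nil_append, Nat.zero_add] at this
    simp only [List.length_cons, Nat.add_sub_cancel]
    rw [this, removeEmptyLoop_eq_filter]

theorem replaceLogical_alt_eq (split : List String) :
    replaceLogical_alt split = (match split with
      | [] => []
      | h :: t => (passFn h t).filter pNE) := by
  match split with
  | [] => rfl
  | h :: t =>
    have := loopB_eq_filter_pass t [] h
    simpa [replaceLogical_alt] using this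

-- ===== VERDICT (by name: the statement is the Claim_ definition above) =====
theorem replaceLogical_spec : Claim_equal_replaceLogical := by
  intro split _
  unfold Spec_replaceLogical
  rw [replaceLogical_eq, replaceLogical_alt_eq]
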